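-- pv_equiv track=rewrite | github.com/itisamazingxx/oa | citadel/SocialMediaSuggestions.py | getRecommendedFriends
-- ===== SOURCE A (Python) =====
-- def getRecommendedFriends(n, friendships):
--   # 首先创建一个邻接表记录用户与其朋友圈关系
--   graph = {i : set() for i in range(n)}
--   for user, friend in friendships:
--     graph[user].add(friend)
--     graph[friend].add(user)
--
--   # 为每位用户推荐其他用户
--   recommandations = [-1] * n
--
--   # 挨个比较两个用户的关系
--   for i in range(n):
--       maxCommonFriend = 0
--       recommandFriend = -1
--       for j in range(n):
--           if i != j and j not in graph[i]:
--               commonFriendsNum = len(graph[i].intersection(graph[j]))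
--               if (commonFriendsNum > maxCommonFriend) or \
--               ((commonFriendsNum == maxCommonFriend and j < recommandFriend)):
--                   maxCommonFriend = commonFriendsNum
--                   recommandFriend = j
--       recommandations[i] = recommandFriend
--   return recommandations
-- ===== SOURCE B (Python) =====
-- def getRecommendedFriends(n, friendships):
--   # adjacency list, then count common friends via friends-of-friends per user
--   adj = [set() for _ in range(n)]
--   for u, v in friendships:
--     adj[u].add(v)
--     adj[v].add(u)
--   out = []
--   for i in range(n):
--     cnt = [0] * n
--     for f in adj[i]:
--       for g in adj[f]:
--         if g != i and g not in adj[i]: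
--           cnt[g] += 1
--     m = max(cnt) if cnt else 0
--     out.append(cnt.index(m) if m > 0 else -1)
--   return out
-- ===== Notes on version B (the rewrite author's own statement) =====
-- stated objective: faster
-- what changed: A intersects the friend sets of every pair (i,j) in a quadratic double loop; B builds an int-indexed adjacency list and, per user, counts candidates by walking friends-of-friends, then takes max(cnt)/cnt.index(max) for the max-count smallest-index recommendation.
import Mathlib
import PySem

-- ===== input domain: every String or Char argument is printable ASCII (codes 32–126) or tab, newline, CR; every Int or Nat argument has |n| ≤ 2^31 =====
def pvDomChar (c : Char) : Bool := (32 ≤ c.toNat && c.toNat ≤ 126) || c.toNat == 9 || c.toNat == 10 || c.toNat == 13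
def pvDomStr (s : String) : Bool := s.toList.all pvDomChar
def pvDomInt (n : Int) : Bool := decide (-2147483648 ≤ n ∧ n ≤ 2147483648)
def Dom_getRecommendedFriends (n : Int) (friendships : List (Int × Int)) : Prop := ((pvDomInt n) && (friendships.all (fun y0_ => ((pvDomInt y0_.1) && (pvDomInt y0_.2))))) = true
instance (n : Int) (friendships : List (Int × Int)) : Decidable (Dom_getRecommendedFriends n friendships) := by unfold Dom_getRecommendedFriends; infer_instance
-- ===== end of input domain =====

-- B replaces A's all-pairs set intersections by friends-of-friends counting per user
-- (objective: faster; return value only, neither program mutates its arguments).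

-- ===== PORT A =====
-- graph = {i: set() for i in range(n)}; graph[user].add(friend); graph[friend].add(user)
-- (the 'none' branches correspond to Python's KeyError, excluded by Pre_)
def pvBuildGraphA (n : Int) (friendships : List (Int × Int)) : PySem.Dict Int (PySem.Set Int) :=
  friendships.foldl (fun g p =>
    let g1 := match g.get? p.1 with
      | some s => g.insert p.1 (PySem.Set.add s p.2)
      | none => g
    match g1.get? p.2 with
      | some s => g1.insert p.2 (PySem.Set.add s p.1)
      | none => g1)
    ((PySem.List.pyRange 0 n 1).foldl (fun d i => d.insert i PySem.Set.empty) PySem.Dict.empty)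

def getRecommendedFriends (n : Int) (friendships : List (Int × Int)) : List Int :=
  let graph := pvBuildGraphA n friendships
  -- recommandations = [-1] * n ; then for i in range(n): inner scan over j in range(n)
  (PySem.List.pyRange 0 n 1).foldl (fun recs i =>
    let res := (PySem.List.pyRange 0 n 1).foldl (fun (st : Int × Int) j =>
      if i ≠ j ∧ ¬ (PySem.Set.contains (graph.getD i PySem.Set.empty) j = true) then
        -- commonFriendsNum = len(graph[i].intersection(graph[j]))
        let c : Int := PySem.List.len
          (PySem.Set.inter (graph.getD i PySem.Set.empty) (graph.getD j PySem.Set.empty))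
        if c > st.1 ∨ (c = st.1 ∧ j < st.2) then (c, j) else st
      else st) ((0 : Int), (-1 : Int))
    PySem.List.pySetD recs i res.2)
    (PySem.List.pyRepeat [(-1 : Int)] n)

-- ===== PORT B =====
-- adj = [set() for _ in range(n)]; adj[u].add(v); adj[v].add(u)  (list indexing, Python-exact)
def pvBuildAdjB (n : Int) (friendships : List (Int × Int)) : List (PySem.Set Int) :=
  friendships.foldl (fun a p =>
    let a1 := PySem.List.pySetD a p.1 (PySem.Set.add (PySem.List.pyGetD a p.1 PySem.Set.empty) p.2)
    PySem.List.pySetD a1 p.2 (PySem.Set.add (PySem.List.pyGetD a1 p.2 PySem.Set.empty) p.1))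
    (List.replicate n.toNat PySem.Set.empty)

def getRecommendedFriends_alt (n : Int) (friendships : List (Int × Int)) : List Int :=
  let adj := pvBuildAdjB n friendships
  (PySem.List.pyRange 0 n 1).foldl (fun out i =>
    -- cnt = [0]*n ; for f in adj[i]: for g in adj[f]: if g != i and g not in adj[i]: cnt[g] += 1
    let cnt := (PySem.List.pyGetD adj i PySem.Set.empty).foldl (fun c f =>
      (PySem.List.pyGetD adj f PySem.Set.empty).foldl (fun c g =>
        if g ≠ i ∧ ¬ (PySem.Set.contains (PySem.List.pyGetD adj i PySem.Set.empty) g = true) then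
          PySem.List.pySetD c g (PySem.List.pyGetD c g 0 + 1)
        else c) c)
      (PySem.List.pyRepeat [(0 : Int)] n)
    -- m = max(cnt); out.append(cnt.index(m) if m > 0 else -1)   ('none' = unreachable ValueError)
    let m : Int := match PySem.List.max? cnt (fun x => x) with
      | some m => m
      | none => 0
    out ++ [if m > 0 then (match PySem.List.index? cnt m with
                            | some k => (k : Int)
                            | none => -1)
            else -1]) []

-- ===== PRECONDITION & SPEC =====
-- Pre_ excludes exactly the inputs on which A raises KeyError: some friendship endpoint
-- is not a key of graph, i.e. not in range(n).
def Pre_getRecommendedFriends (n : Int) (friendships : List (Int × Int)) : Prop :=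
  ∀ p ∈ friendships, (0 ≤ p.1 ∧ p.1 < n) ∧ (0 ≤ p.2 ∧ p.2 < n)
instance (n : Int) (friendships : List (Int × Int)) : Decidable (Pre_getRecommendedFriends n friendships) := by unfold Pre_getRecommendedFriends; infer_instance

def pvWitness_getRecommendedFriends : Int × (List (Int × Int)) := (4, [(0, 1), (1, 2), (0, 3)])

def Spec_getRecommendedFriends (n : Int) (friendships : List (Int × Int)) (out : List Int) : Prop := out = getRecommendedFriends_alt n friendships
instance (n : Int) (friendships : List (Int × Int)) (out : List Int) : Decidable (Spec_getRecommendedFriends n friendships out) := by unfold Spec_getRecommendedFriends; infer_instance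

-- ===== CLAIM (what is proved, stated in full; the proofs are below) =====
def Claim_equal_getRecommendedFriends : Prop := ∀ (n : Int) (friendships : List (Int × Int)), Dom_getRecommendedFriends n friendships → Pre_getRecommendedFriends n friendships → Spec_getRecommendedFriends n friendships (getRecommendedFriends n friendships)


-- ===== LEMMAS AND PROOFS =====

-- an (undirected) edge of the input
def pvEdge (fr : List (Int × Int)) (a b : Int) : Prop := (a, b) ∈ fr ∨ (b, a) ∈ fr

-- the initial dict {i: set() for i in range(n)} maps everything to the empty set
lemma pv_init_getD (l : List Int) (d : PySem.Dict Int (PySem.Set Int))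
    (h : ∀ k, d.getD k PySem.Set.empty = PySem.Set.empty) (k : Int) :
    (l.foldl (fun d i => d.insert i PySem.Set.empty) d).getD k PySem.Set.empty = PySem.Set.empty := by
  induction l generalizing d with
  | nil => exact h k
  | cons x xs ih =>
      refine ih _ (fun k' => ?_)
      rw [PySem.Dict.getD_insert]
      split
      · rfl
      · exact h _

-- a contained key's lookup
lemma pv_get?_eq (g : PySem.Dict Int (PySem.Set Int)) (k : Int) (h : g.contains k = true) :
    g.get? k = some (g.getD k PySem.Set.empty) := by
  rw [PySem.Dict.contains_eq_isSome_get?] at h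
  cases hg : g.get? k with
  | none => rw [hg] at h; simp at h
  | some w => rw [PySem.Dict.getD_of_get?_eq_some _ _ hg]

-- the two adjacency builds agree: same keys/indices, same set lists, members in range,
-- nodup, and membership is exactly "edge seen so far or already present"
lemma pv_build (n : Int) :
    ∀ (fr : List (Int × Int)) (P : Int → Int → Prop)
      (g : PySem.Dict Int (PySem.Set Int)) (a : List (PySem.Set Int)),
      (∀ p ∈ fr, (0 ≤ p.1 ∧ p.1 < n) ∧ (0 ≤ p.2 ∧ p.2 < n)) →
      a.length = n.toNat →
      (∀ k, g.contains k = true ↔ (0 ≤ k ∧ k < n)) →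
      g.keys.Nodup →
      (∀ k, (g.getD k PySem.Set.empty).Nodup) →
      (∀ k x, x ∈ g.getD k PySem.Set.empty ↔ ((0 ≤ k ∧ k < n) ∧ (0 ≤ x ∧ x < n) ∧ P k x)) →
      (∀ k, 0 ≤ k → k < n → g.getD k PySem.Set.empty = PySem.List.pyGetD a k PySem.Set.empty) →
      (let g' := fr.foldl (fun g p =>
          let g1 := match g.get? p.1 with
            | some s => g.insert p.1 (PySem.Set.add s p.2)
            | none => g
          match g1.get? p.2 with
            | some s => g1.insert p.2 (PySem.Set.add s p.1)
            | none => g1) g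
       let a' := fr.foldl (fun a p =>
          let a1 := PySem.List.pySetD a p.1 (PySem.Set.add (PySem.List.pyGetD a p.1 PySem.Set.empty) p.2)
          PySem.List.pySetD a1 p.2 (PySem.Set.add (PySem.List.pyGetD a1 p.2 PySem.Set.empty) p.1)) a
       a'.length = n.toNat ∧
       (∀ k, (g'.getD k PySem.Set.empty).Nodup) ∧
       (∀ k x, x ∈ g'.getD k PySem.Set.empty ↔
          ((0 ≤ k ∧ k < n) ∧ (0 ≤ x ∧ x < n) ∧ (P k x ∨ pvEdge fr k x))) ∧
       (∀ k, 0 ≤ k → k < n → g'.getD k PySem.Set.empty = PySem.List.pyGetD a' k PySem.Set.empty)) := by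
  intro fr
  induction fr with
  | nil =>
      intro P g a hfr hlen hcont hknd hnd hchar heq
      simp only [List.foldl_nil]
      refine ⟨hlen, hnd, fun k x => ?_, heq⟩
      rw [hchar k x]
      simp [pvEdge]
  | cons p fr ih =>
      intro P g a hfr hlen hcont hknd hnd hchar heq
      obtain ⟨u, v⟩ := p
      obtain ⟨⟨hu0, hu1⟩, hv0, hv1⟩ := hfr (u, v) (by simp)
      simp only [List.foldl_cons]
      -- the A step
      have hgu : g.get? u = some (g.getD u PySem.Set.empty) := pv_get?_eq g u ((hcont u).mpr ⟨hu0, hu1⟩)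
      set s : PySem.Set Int := g.getD u PySem.Set.empty with hsdef
      set g1 : PySem.Dict Int (PySem.Set Int) := g.insert u (PySem.Set.add s v) with hg1def
      have hcont1 : ∀ k, g1.contains k = (k == u || g.contains k) := by
        intro k; rw [hg1def, PySem.Dict.contains_insert]
      have hcont1' : ∀ k, g1.contains k = true ↔ (0 ≤ k ∧ k < n) := by
        intro k
        rw [hcont1]
        simp only [Bool.or_eq_true, beq_iff_eq, hcont k]
        constructor
        · rintro (rfl | h)
          · exact ⟨hu0, hu1⟩
          · exact h
        · exact Or.inr
      have hG1 : ∀ k, g1.getD k PySem.Set.empty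
          = if k = u then PySem.Set.add s v else g.getD k PySem.Set.empty := by
        intro k; rw [hg1def, PySem.Dict.getD_insert]
      have hg1v : g1.get? v = some (g1.getD v PySem.Set.empty) :=
        pv_get?_eq g1 v ((hcont1' v).mpr ⟨hv0, hv1⟩)
      set g2 : PySem.Dict Int (PySem.Set Int)
        := g1.insert v (PySem.Set.add (g1.getD v PySem.Set.empty) u) with hg2def
      have hG2 : ∀ k, g2.getD k PySem.Set.empty
          = if k = v then PySem.Set.add (g1.getD v PySem.Set.empty) u
            else g1.getD k PySem.Set.empty := by
        intro k; rw [hg2def, PySem.Dict.getD_insert]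
      have hcont2' : ∀ k, g2.contains k = true ↔ (0 ≤ k ∧ k < n) := by
        intro k
        rw [hg2def, PySem.Dict.contains_insert]
        simp only [Bool.or_eq_true, beq_iff_eq, hcont1' k]
        constructor
        · rintro (rfl | h)
          · exact ⟨hv0, hv1⟩
          · exact h
        · exact Or.inr
      -- the B step
      set a1 : List (PySem.Set Int)
        := PySem.List.pySetD a u (PySem.Set.add (PySem.List.pyGetD a u PySem.Set.empty) v) with ha1def
      set a2 : List (PySem.Set Int)
        := PySem.List.pySetD a1 v (PySem.Set.add (PySem.List.pyGetD a1 v PySem.Set.empty) u) with ha2def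
      have hlen1 : a1.length = n.toNat := by rw [ha1def, PySem.List.length_pySetD, hlen]
      have hlen2 : a2.length = n.toNat := by rw [ha2def, PySem.List.length_pySetD, hlen1]
      have hA1 : ∀ k, 0 ≤ k → k < n → PySem.List.pyGetD a1 k PySem.Set.empty
          = if k = u then PySem.Set.add (PySem.List.pyGetD a u PySem.Set.empty) v
            else PySem.List.pyGetD a k PySem.Set.empty := by
        intro k hk0 hk1
        rw [ha1def, PySem.List.pySetD_of_nonneg _ _ hu0]
        rw [PySem.List.pyGetD_eq_getElem _ _ hk0 (by simp [hlen]; omega)]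
        rw [List.getElem_set]
        by_cases hku : k = u
        · rw [if_pos (by omega), if_pos hku]
        · rw [if_neg (by omega), if_neg hku,
              PySem.List.pyGetD_eq_getElem _ _ hk0 (by rw [hlen]; omega)]
      have hA2 : ∀ k, 0 ≤ k → k < n → PySem.List.pyGetD a2 k PySem.Set.empty
          = if k = v then PySem.Set.add (PySem.List.pyGetD a1 v PySem.Set.empty) u
            else PySem.List.pyGetD a1 k PySem.Set.empty := by
        intro k hk0 hk1
        rw [ha2def, PySem.List.pySetD_of_nonneg _ _ hv0]
        rw [PySem.List.pyGetD_eq_getElem _ _ hk0 (by simp [hlen1]; omega)]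
        rw [List.getElem_set]
        by_cases hkv : k = v
        · rw [if_pos (by omega), if_pos hkv]
        · rw [if_neg (by omega), if_neg hkv,
              PySem.List.pyGetD_eq_getElem _ _ hk0 (by rw [hlen1]; omega)]
      -- matching up the two steps
      have heq1 : ∀ k, 0 ≤ k → k < n →
          g1.getD k PySem.Set.empty = PySem.List.pyGetD a1 k PySem.Set.empty := by
        intro k hk0 hk1
        rw [hG1, hA1 k hk0 hk1, ← heq u hu0 hu1, ← hsdef]
        by_cases hku : k = u
        · rw [if_pos hku, if_pos hku]
        · rw [if_neg hku, if_neg hku, heq k hk0 hk1]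
      have heq2 : ∀ k, 0 ≤ k → k < n →
          g2.getD k PySem.Set.empty = PySem.List.pyGetD a2 k PySem.Set.empty := by
        intro k hk0 hk1
        rw [hG2, hA2 k hk0 hk1, ← heq1 v hv0 hv1]
        by_cases hkv : k = v
        · rw [if_pos hkv, if_pos hkv]
        · rw [if_neg hkv, if_neg hkv, heq1 k hk0 hk1]
      have hnd2 : ∀ k, (g2.getD k PySem.Set.empty).Nodup := by
        intro k
        rw [hG2]
        have hnd1 : ∀ k', (g1.getD k' PySem.Set.empty).Nodup := by
          intro k'
          rw [hG1]
          split
          · exact PySem.Set.nodup_add _ _ (hnd u)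
          · exact hnd k'
        split
        · exact PySem.Set.nodup_add _ _ (hnd1 v)
        · exact hnd1 k
      have hchar2 : ∀ k x, x ∈ g2.getD k PySem.Set.empty ↔
          ((0 ≤ k ∧ k < n) ∧ (0 ≤ x ∧ x < n) ∧
            (P k x ∨ (k = u ∧ x = v) ∨ (k = v ∧ x = u))) := by
        intro k x
        have hchar1 : ∀ k' x', x' ∈ g1.getD k' PySem.Set.empty ↔
            ((0 ≤ k' ∧ k' < n) ∧ (0 ≤ x' ∧ x' < n) ∧ (P k' x' ∨ (k' = u ∧ x' = v))) := by
          intro k' x'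
          rw [hG1]
          by_cases hku : k' = u
          · subst hku
            rw [if_pos rfl, PySem.Set.mem_add, hchar k' x']
            constructor
            · rintro (⟨h1, h2, h3⟩ | rfl)
              · exact ⟨h1, h2, Or.inl h3⟩
              · exact ⟨⟨hu0, hu1⟩, ⟨hv0, hv1⟩, Or.inr ⟨rfl, rfl⟩⟩
            · rintro ⟨h1, h2, (h3 | ⟨-, rfl⟩)⟩
              · exact Or.inl ⟨h1, h2, h3⟩
              · exact Or.inr rfl
          · rw [if_neg hku, hchar k' x']
            constructor
            · rintro ⟨h1, h2, h3⟩
              exact ⟨h1, h2, Or.inl h3⟩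
            · rintro ⟨h1, h2, (h3 | ⟨rfl, rfl⟩)⟩
              · exact ⟨h1, h2, h3⟩
              · exact absurd rfl hku
        rw [hG2]
        by_cases hkv : k = v
        · subst hkv
          rw [if_pos rfl, PySem.Set.mem_add, hchar1 k x]
          constructor
          · rintro (⟨h1, h2, h3⟩ | rfl)
            · refine ⟨h1, h2, ?_⟩
              tauto
            · exact ⟨⟨hv0, hv1⟩, ⟨hu0, hu1⟩, Or.inr (Or.inr ⟨rfl, rfl⟩)⟩
          · rintro ⟨h1, h2, (h3 | ⟨rfl, rfl⟩ | ⟨-, rfl⟩)⟩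
            · exact Or.inl ⟨h1, h2, Or.inl h3⟩
            · exact Or.inl ⟨h1, h2, Or.inr ⟨rfl, rfl⟩⟩
            · exact Or.inr rfl
        · rw [if_neg hkv, hchar1 k x]
          constructor
          · rintro ⟨h1, h2, h3⟩
            refine ⟨h1, h2, ?_⟩
            tauto
          · rintro ⟨h1, h2, (h3 | ⟨rfl, rfl⟩ | ⟨rfl, rfl⟩)⟩
            · exact ⟨h1, h2, Or.inl h3⟩
            · exact ⟨h1, h2, Or.inr ⟨rfl, rfl⟩⟩
            · exact absurd rfl hkv
      -- apply the induction hypothesis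
      have hknd2 : g2.keys.Nodup := by
        rw [hg2def, hg1def]
        exact PySem.Dict.nodup_keys_insert _ _ _ (PySem.Dict.nodup_keys_insert _ _ _ hknd)
      have hstepA : (match (match g.get? u with
              | some s => g.insert u (PySem.Set.add s v)
              | none => g).get? v with
          | some s => (match g.get? u with
              | some s => g.insert u (PySem.Set.add s v)
              | none => g).insert v (PySem.Set.add s u)
          | none => match g.get? u with
              | some s => g.insert u (PySem.Set.add s v)
              | none => g) = g2 := by
        simp only [hgu]
        rw [← hg1def]
        simp only [hg1v]
        exact hg2def.symm
      have hih := ih (fun x y => P x y ∨ (x = u ∧ y = v) ∨ (x = v ∧ y = u)) g2 a2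
        (fun p hp => hfr p (by simp [hp])) hlen2 hcont2' hknd2 hnd2 hchar2 heq2
      rw [hstepA]
      obtain ⟨c1, c2, c3, c4⟩ := hih
      refine ⟨c1, c2, fun k x => ?_, c4⟩
      rw [c3 k x]
      constructor
      · rintro ⟨h1, h2, h3⟩
        refine ⟨h1, h2, ?_⟩
        unfold pvEdge at *
        simp only [List.mem_cons, Prod.mk.injEq] at *
        tauto
      · rintro ⟨h1, h2, h3⟩
        refine ⟨h1, h2, ?_⟩
        unfold pvEdge at *
        simp only [List.mem_cons, Prod.mk.injEq] at *
        tauto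

-- the running max of A's scan
def pvM (v : Int → Int) (a b m : Int) : Int := ((PySem.List.pyRange a b 1).map v).foldl max m

-- the first index attaining M
def pvPick (v : Int → Int) (a b M : Int) : Int :=
  (((PySem.List.pyRange a b 1).find? (fun j => v j == M))).getD (-1)

-- A's inner scan, characterized: guarded strict-improvement fold = (max, first argmax)
lemma pv_selA (adm : Int → Prop) [DecidablePred adm] (w : Int → Int)
    (hw : ∀ j, adm j → 0 ≤ w j) :
    ∀ (k : Nat) (a m r : Int), 0 ≤ m → r < a →
    ((PySem.List.pyRange a (a + k) 1).foldl (fun (st : Int × Int) j =>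
        if adm j then
          if w j > st.1 ∨ (w j = st.1 ∧ j < st.2) then (w j, j) else st
        else st) (m, r))
      = (pvM (fun j => if adm j then w j else 0) a (a + k) m,
         if pvM (fun j => if adm j then w j else 0) a (a + k) m = m then r
         else pvPick (fun j => if adm j then w j else 0) a (a + k)
                (pvM (fun j => if adm j then w j else 0) a (a + k) m)) := by
  intro k
  induction k with
  | zero =>
      intro a m r _ _
      simp [PySem.List.pyRange_one_eq_nil, pvM]
  | succ k ih =>
      intro a m r hm hr
      set v : Int → Int := fun j => if adm j then w j else 0 with hv
      have hva0 : 0 ≤ v a := by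
        by_cases h : adm a
        · simpa [hv, h] using hw a h
        · simp [hv, h]
      have hcast : a + ((k + 1 : Nat) : Int) = (a + 1) + (k : Nat) := by omega
      rw [hcast]
      rw [PySem.List.pyRange_one_cons (by omega)]
      simp only [List.foldl_cons]
      have hMfull : pvM v a (a + 1 + (k : Nat)) m = pvM v (a + 1) (a + 1 + (k : Nat)) (max m (v a)) := by
        unfold pvM
        rw [PySem.List.pyRange_one_cons (by omega)]
        simp only [List.map_cons, List.foldl_cons]
      have hpickfull : ∀ M, pvPick v a (a + 1 + (k : Nat)) M
          = if v a = M then a else pvPick v (a + 1) (a + 1 + (k : Nat)) M := by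
        intro M
        unfold pvPick
        rw [PySem.List.pyRange_one_cons (by omega), List.find?_cons]
        by_cases hva : v a = M
        · simp [hva]
        · have hbeq : (v a == M) = false := by simpa using hva
          rw [hbeq]
          simp [hva]
      have hnoup : (¬ adm a) ∨ (adm a ∧ w a ≤ m) →
          (List.foldl (fun (st : Int × Int) j =>
            if adm j then
              if w j > st.1 ∨ (w j = st.1 ∧ j < st.2) then (w j, j) else st
            else st) (m, r) (PySem.List.pyRange (a + 1) (a + 1 + (k : Nat)) 1))
          = (pvM v a (a + 1 + (k : Nat)) m,
             if pvM v a (a + 1 + (k : Nat)) m = m then r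
             else pvPick v a (a + 1 + (k : Nat)) (pvM v a (a + 1 + (k : Nat)) m)) := by
        intro hcase
        have hvale : v a ≤ m := by
          rcases hcase with h | ⟨h1, h2⟩
          · simp [hv, h, hm]
          · simpa [hv, h1] using h2
        have hM : pvM v a (a + 1 + (k : Nat)) m = pvM v (a + 1) (a + 1 + (k : Nat)) m := by
          rw [hMfull]
          congr 1
          omega
        rw [ih (a + 1) m r hm (by omega), ← hM]
        by_cases hMm : pvM v a (a + 1 + (k : Nat)) m = m
        · rw [if_pos hMm, if_pos hMm]
        · rw [if_neg hMm, if_neg hMm]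
          have hmle : m ≤ pvM v a (a + 1 + (k : Nat)) m := by
            rw [hM]
            exact (PySem.List.le_foldl_max _ _).1
          rw [hpickfull]
          rw [if_neg (by omega)]
      by_cases hadm : adm a
      · have hvaw : v a = w a := by simp [hv, hadm]
        by_cases hgt : w a > m
        · rw [if_pos hadm, if_pos (Or.inl hgt)]
          rw [ih (a + 1) (w a) a (by omega) (by omega)]
          have hM : pvM v (a + 1) (a + 1 + (k : Nat)) (w a)
              = pvM v a (a + 1 + (k : Nat)) m := by
            rw [hMfull]
            congr 1
            rw [hvaw]
            omega
          rw [hM]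
          have hwle : w a ≤ pvM v a (a + 1 + (k : Nat)) m := by
            rw [← hM]
            exact (PySem.List.le_foldl_max _ _).1
          have hMne : pvM v a (a + 1 + (k : Nat)) m ≠ m := by omega
          rw [if_neg hMne, hpickfull, hvaw]
          by_cases hMa : pvM v a (a + 1 + (k : Nat)) m = w a
          · simp [hMa]
          · rw [if_neg hMa, if_neg (fun h => hMa h.symm)]
        · have htie : ¬ (w a > m ∨ (w a = m ∧ a < r)) := by
            rintro (h | ⟨h1, h2⟩)
            · exact hgt h
            · omega
          rw [if_pos hadm, if_neg htie]
          exact hnoup (Or.inr ⟨hadm, by omega⟩)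
      · rw [if_neg hadm]
        exact hnoup (Or.inl hadm)

-- list.index on a range-mapped list finds pvPick
lemma pv_index (v : Int → Int) (M : Int) :
    ∀ (k : Nat) (a : Int), (∃ j ∈ PySem.List.pyRange a (a + k) 1, v j = M) →
    a ≤ pvPick v a (a + k) M ∧
    PySem.List.index? ((PySem.List.pyRange a (a + k) 1).map v) M
      = some (pvPick v a (a + k) M - a).toNat := by
  intro k
  induction k with
  | zero =>
      intro a hex
      simp [PySem.List.pyRange_one_eq_nil] at hex
  | succ k ih =>
      intro a hex
      have hcast : a + ((k + 1 : Nat) : Int) = (a + 1) + (k : Nat) := by omega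
      rw [hcast] at hex ⊢
      have hpe : pvPick v a (a + 1 + (k : Nat)) M
          = if v a = M then a else pvPick v (a + 1) (a + 1 + (k : Nat)) M := by
        unfold pvPick
        rw [PySem.List.pyRange_one_cons (by omega), List.find?_cons]
        by_cases hva : v a = M
        · simp [hva]
        · have hbeq : (v a == M) = false := by simpa using hva
          rw [hbeq]
          simp [hva]
      by_cases hva : v a = M
      · rw [hpe, if_pos hva]
        refine ⟨le_refl a, ?_⟩
        unfold PySem.List.index?
        rw [PySem.List.pyRange_one_cons (by omega), List.map_cons, List.idxOf?_cons]
        simp [hva]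
      · have hex' : ∃ j ∈ PySem.List.pyRange (a + 1) (a + 1 + (k : Nat)) 1, v j = M := by
          obtain ⟨j, hj, hvj⟩ := hex
          rw [PySem.List.pyRange_one_cons (by omega)] at hj
          rcases List.mem_cons.mp hj with h | h
          · exact absurd (h ▸ hvj) hva
          · exact ⟨j, h, hvj⟩
        obtain ⟨hle, hidx⟩ := ih (a + 1) hex'
        rw [hpe, if_neg hva]
        refine ⟨by omega, ?_⟩
        unfold PySem.List.index? at hidx ⊢
        rw [PySem.List.pyRange_one_cons (by omega), List.map_cons, List.idxOf?_cons]
        have hbeq : (v a == M) = false := by simpa using hva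
        rw [hbeq, hidx]
        simp only [Bool.false_eq_true, if_false, Option.map_some, Option.some.injEq]
        omega

-- one guarded-increment pass adds the (guarded) multiplicity
lemma pv_incr_len (gs : List Int) (p : Int → Prop) [DecidablePred p] (c : List Int) :
    (gs.foldl (fun c g =>
        if p g then PySem.List.pySetD c g (PySem.List.pyGetD c g 0 + 1) else c) c).length
      = c.length := by
  induction gs generalizing c with
  | nil => rfl
  | cons g gs ih =>
      simp only [List.foldl_cons]
      by_cases hp : p g
      · simp only [if_pos hp]; rw [ih, PySem.List.length_pySetD]
      · simp only [if_neg hp]; exact ih c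
lemma pv_incr (p : Int → Prop) [DecidablePred p] :
    ∀ (gs : List Int) (c : List Int) (j : Int), 0 ≤ j → j < (c.length : Int) →
      (∀ g ∈ gs, 0 ≤ g ∧ g < (c.length : Int)) →
    (gs.foldl (fun c g =>
        if p g then PySem.List.pySetD c g (PySem.List.pyGetD c g 0 + 1) else c) c).getD j.toNat 0
      = c.getD j.toNat 0 + (if p j then (gs.count j : Int) else 0) := by
  intro gs
  induction gs with
  | nil => intro c j _ _ _; simp
  | cons g gs ih =>
      intro c j hj0 hj1 hb
      obtain ⟨hg0, hg1⟩ := hb g (by simp)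
      simp only [List.foldl_cons]
      by_cases hp : p g
      · simp only [if_pos hp]
        rw [ih _ j hj0 (by rwa [PySem.List.length_pySetD]) (by
          intro g' hg'; rw [PySem.List.length_pySetD]; exact hb g' (by simp [hg']))]
        rw [PySem.List.pySetD_of_nonneg _ _ hg0,
            PySem.List.pyGetD_eq_getElem _ _ hg0 hg1]
        have hjlt : j.toNat < c.length := by omega
        have hglt : g.toNat < c.length := by omega
        rw [List.getD_eq_getElem _ _ (by simpa using hjlt),
            List.getD_eq_getElem _ _ hjlt, List.getElem_set]
        by_cases hjg : j = g
        · subst hjg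
          simp only [List.count_cons, beq_self_eq_true, if_pos hp]
          simp; omega
        · have : ¬ (g.toNat = j.toNat) := by omega
          rw [if_neg this]
          simp only [List.count_cons, beq_iff_eq]
          have : ¬ (g = j) := fun h => hjg h.symm
          rw [if_neg this]
          split <;> omega
      · simp only [if_neg hp]
        rw [ih _ j hj0 hj1 (fun g' hg' => hb g' (by simp [hg']))]
        simp only [List.count_cons, beq_iff_eq]
        by_cases hpj : p j
        · have hjg : ¬ (g = j) := fun h => hp (h ▸ hpj)
          rw [if_neg hjg]; simp
        · simp [hpj]

-- the whole counting double loop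
lemma pv_cnt (p : Int → Prop) [DecidablePred p] (S : Int → List Int) :
    ∀ (fs : List Int) (c : List Int) (j : Int), 0 ≤ j → j < (c.length : Int) →
      (∀ f ∈ fs, ∀ g ∈ S f, 0 ≤ g ∧ g < (c.length : Int)) →
    (fs.foldl (fun c f => (S f).foldl (fun c g =>
        if p g then PySem.List.pySetD c g (PySem.List.pyGetD c g 0 + 1) else c) c) c).getD j.toNat 0
      = c.getD j.toNat 0 + (if p j then ((fs.map (fun f => ((S f).count j : Int))).sum) else 0) := by
  intro fs
  induction fs with
  | nil => intro c j _ _ _; simp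
  | cons f fs ih =>
      intro c j hj0 hj1 hb
      simp only [List.foldl_cons]
      rw [ih _ j hj0 (by rw [pv_incr_len]; exact hj1) (by
        intro f' hf' g hg; rw [pv_incr_len]; exact hb f' (by simp [hf']) g hg)]
      rw [pv_incr p (S f) c j hj0 hj1 (hb f (by simp))]
      simp only [List.map_cons, List.sum_cons]
      split <;> omega

lemma pv_cnt_len (S : Int → List Int) :
    ∀ (fs : List Int) (c : List Int) (p : Int → Prop) [DecidablePred p],
    (fs.foldl (fun c f => (S f).foldl (fun c g =>
        if p g then PySem.List.pySetD c g (PySem.List.pyGetD c g 0 + 1) else c) c) c).length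
      = c.length := by
  intro fs
  induction fs with
  | nil => intro c p _; rfl
  | cons f fs ih => intro c p _; simp only [List.foldl_cons]; rw [ih, pv_incr_len]

-- counting 0/1 multiplicities over nodup sets
lemma pv_sum_count (S : Int → List Int) (j : Int) :
    ∀ (fs : List Int), (∀ f ∈ fs, (S f).Nodup) →
    ((fs.map (fun f => ((S f).count j : Int))).sum)
      = ((fs.countP (fun f => decide (j ∈ S f)) : Nat) : Int) := by
  intro fs hnd
  induction fs with
  | nil => rfl
  | cons f fs ih =>
      simp only [List.map_cons, List.sum_cons, List.countP_cons]
      rw [ih (fun f hf => hnd f (List.mem_cons_of_mem _ hf))]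
      by_cases hj : j ∈ S f
      · rw [List.count_eq_one_of_mem (hnd f (by simp)) hj]
        simp [hj]; omega
      · rw [List.count_eq_zero.mpr hj]
        simp [hj]

-- the recommandations array fold: successive in-range assignments build the map
lemma pv_outerA (h : Int → Int) :
    ∀ (m : Nat) (init : List Int), m ≤ init.length →
    ((PySem.List.pyRange 0 (m : Int) 1).foldl (fun recs i => PySem.List.pySetD recs i (h i)) init)
      = (PySem.List.pyRange 0 (m : Int) 1).map h ++ init.drop m := by
  intro m
  induction m with
  | zero => intro init _; simp [PySem.List.pyRange_one_eq_nil]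
  | succ m ih =>
      intro init hlen
      have h1 : ((m : Int) + 1) = ((m + 1 : Nat) : Int) := by omega
      rw [← h1, PySem.List.pyRange_one_succ_right (by positivity), List.foldl_append,
          List.map_append, ih init (by omega)]
      simp only [List.foldl_cons, List.foldl_nil, List.map_cons, List.map_nil]
      rw [PySem.List.pySetD_of_nonneg _ _ (by positivity)]
      have hm : m < init.length := by omega
      have hdrop : init.drop m = init[m] :: init.drop (m + 1) := (List.getElem_cons_drop hm).symm
      have hlenmap : ((PySem.List.pyRange 0 (m : Int) 1).map h).length = m := by
        rw [List.length_map, PySem.List.length_pyRange_one]; omega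
      have hmt : (m : Int).toNat = m := by omega
      rw [hmt, hdrop, List.set_append, hlenmap, if_neg (lt_irrefl m), Nat.sub_self,
          List.set_cons_zero, List.append_assoc, List.singleton_append]

-- one user's recommendation: A's pairwise scan equals B's friends-of-friends count
lemma pv_per_i (n : Int) (fr : List (Int × Int)) (S : Int → PySem.Set Int)
    (AL : List (PySem.Set Int))
    (hnd : ∀ k, (S k).Nodup)
    (hchar : ∀ k x, x ∈ S k ↔ ((0 ≤ k ∧ k < n) ∧ (0 ≤ x ∧ x < n) ∧ pvEdge fr k x))
    (hlen : AL.length = n.toNat)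
    (heq : ∀ k, 0 ≤ k → k < n → S k = PySem.List.pyGetD AL k PySem.Set.empty)
    (i : Int) (hi0 : 0 ≤ i) (hi1 : i < n) :
    ((PySem.List.pyRange 0 n 1).foldl (fun (st : Int × Int) j =>
        if i ≠ j ∧ ¬ (PySem.Set.contains (S i) j = true) then
          if PySem.List.len (PySem.Set.inter (S i) (S j)) > st.1 ∨
             (PySem.List.len (PySem.Set.inter (S i) (S j)) = st.1 ∧ j < st.2) then
            (PySem.List.len (PySem.Set.inter (S i) (S j)), j)
          else st
        else st) ((0 : Int), (-1 : Int))).2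
    = (let cnt := (PySem.List.pyGetD AL i PySem.Set.empty).foldl (fun c f =>
        (PySem.List.pyGetD AL f PySem.Set.empty).foldl (fun c g =>
          if g ≠ i ∧ ¬ (PySem.Set.contains (PySem.List.pyGetD AL i PySem.Set.empty) g = true) then
            PySem.List.pySetD c g (PySem.List.pyGetD c g 0 + 1)
          else c) c)
        (PySem.List.pyRepeat [(0 : Int)] n)
      let m : Int := match PySem.List.max? cnt (fun x => x) with
        | some m => m
        | none => 0
      if m > 0 then (match PySem.List.index? cnt m with
                      | some k => (k : Int)
                      | none => -1)
      else -1) := by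
  have hmem : ∀ k x, x ∈ S k → (0 ≤ k ∧ k < n) ∧ (0 ≤ x ∧ x < n) := by
    intro k x hx
    have h := (hchar k x).mp hx
    exact ⟨h.1, h.2.1⟩
  have hsym : ∀ k x, x ∈ S k ↔ k ∈ S x := by
    intro k x
    rw [hchar k x, hchar x k]
    unfold pvEdge
    tauto
  have hk : ((n.toNat : Nat) : Int) = n := by omega
  have hw : ∀ j, (i ≠ j ∧ ¬ (PySem.Set.contains (S i) j = true)) →
      0 ≤ PySem.List.len (PySem.Set.inter (S i) (S j)) := by
    intro j _
    rw [PySem.List.len_eq]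
    positivity
  have hsel := pv_selA (fun j => i ≠ j ∧ ¬ (PySem.Set.contains (S i) j = true))
    (fun j => PySem.List.len (PySem.Set.inter (S i) (S j))) hw n.toNat 0 0 (-1)
    le_rfl (by norm_num)
  simp only [zero_add] at hsel
  rw [hk] at hsel
  set v : Int → Int := fun j =>
    if i ≠ j ∧ ¬ (PySem.Set.contains (S i) j = true)
    then PySem.List.len (PySem.Set.inter (S i) (S j)) else 0 with hv
  rw [hsel]
  have hM0 : 0 ≤ pvM v 0 n 0 := by
    unfold pvM
    exact (PySem.List.le_foldl_max _ _).1
  -- B's side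
  have hSAL : PySem.List.pyGetD AL i PySem.Set.empty = S i := (heq i hi0 hi1).symm
  rw [hSAL, PySem.List.pyRepeat_singleton]
  have hvt : ∀ (j : Int), 0 ≤ j → j < n → v j
      = if j ≠ i ∧ ¬ (PySem.Set.contains (S i) j = true)
        then ((((S i).countP (fun f => decide (j ∈ S f))) : Nat) : Int) else 0 := by
    intro j _ _
    simp only [hv]
    have hiff : (i ≠ j ∧ ¬ (PySem.Set.contains (S i) j = true))
        ↔ (j ≠ i ∧ ¬ (PySem.Set.contains (S i) j = true)) := by
      constructor
      · rintro ⟨h1, h2⟩; exact ⟨h1.symm, h2⟩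
      · rintro ⟨h1, h2⟩; exact ⟨h1.symm, h2⟩
    rw [if_congr hiff rfl rfl]
    have hwc : PySem.List.len (PySem.Set.inter (S i) (S j))
        = ((((S i).countP (fun f => decide (j ∈ S f))) : Nat) : Int) := by
      rw [List.countP_eq_length_filter]
      unfold PySem.Set.inter
      rw [PySem.List.len_eq]
      congr 2
      apply List.filter_congr
      intro f hf
      rw [eq_comm, Bool.eq_iff_iff]
      simp only [decide_eq_true_eq]
      exact (hsym j f).symm.trans (PySem.Set.contains_iff _ _).symm
    rw [hwc]
  -- the computed counter list is the values list
  have hcntlen : ((S i).foldl (fun c f =>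
      (PySem.List.pyGetD AL f PySem.Set.empty).foldl (fun c g =>
        if g ≠ i ∧ ¬ (PySem.Set.contains (S i) g = true) then
          PySem.List.pySetD c g (PySem.List.pyGetD c g 0 + 1)
        else c) c) (List.replicate n.toNat (0 : Int))).length = n.toNat := by
    rw [pv_cnt_len]
    simp
  have hcnt : (S i).foldl (fun c f =>
      (PySem.List.pyGetD AL f PySem.Set.empty).foldl (fun c g =>
        if g ≠ i ∧ ¬ (PySem.Set.contains (S i) g = true) then
          PySem.List.pySetD c g (PySem.List.pyGetD c g 0 + 1)
        else c) c) (List.replicate n.toNat (0 : Int))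
      = (PySem.List.pyRange 0 n 1).map v := by
    apply List.ext_getElem
    · rw [hcntlen, List.length_map, PySem.List.length_pyRange_one]
      omega
    · intro t h1 h2
      have ht : t < n.toNat := by rwa [hcntlen] at h1
      have hcast : ((t : Int)).toNat = t := by omega
      have hgetd := pv_cnt (fun g => g ≠ i ∧ ¬ (PySem.Set.contains (S i) g = true))
        (fun f => PySem.List.pyGetD AL f PySem.Set.empty) (S i)
        (List.replicate n.toNat (0 : Int)) (t : Int) (by omega)
        (by simp; omega)
        (by
          intro f hf g hg
          have hfb := (hmem i f hf).2
          change g ∈ PySem.List.pyGetD AL f PySem.Set.empty at hg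
          rw [← heq f hfb.1 hfb.2] at hg
          have hgb := (hmem f g hg).2
          simp
          omega)
      rw [hcast] at hgetd
      rw [← List.getD_eq_getElem _ 0 h1, hgetd]
      have hsum : ((S i).map (fun f => ((PySem.List.pyGetD AL f PySem.Set.empty).count (t : Int) : Int))).sum
          = (((S i).countP (fun f => decide ((t : Int) ∈ S f))) : Int) := by
        rw [List.map_congr_left (fun f hf => by
          rw [← heq f (hmem i f hf).2.1 (hmem i f hf).2.2])]
        exact pv_sum_count S (t : Int) (S i) (fun f hf => hnd f)
      rw [hsum]
      rw [List.getElem_map, PySem.List.getElem_pyRange_one]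
      rw [hvt (0 + (t : Int)) (by omega) (by
        simp only [List.length_map, PySem.List.length_pyRange_one] at h2
        omega)]
      have hrep : (List.replicate n.toNat (0 : Int)).getD t 0 = 0 := by
        rw [List.getD_eq_getElem _ _ (by simpa using ht)]
        simp
      rw [hrep]
      simp only [zero_add]
  rw [hcnt]
  -- evaluate max and index on the values list
  have hn0 : (0 : Int) < n := by omega
  have hcons : PySem.List.pyRange 0 n 1 = 0 :: PySem.List.pyRange 1 n 1 :=
    PySem.List.pyRange_one_cons hn0
  have hv00 : 0 ≤ v 0 := by
    simp only [hv]
    split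
    · exact hw 0 (by assumption)
    · exact le_refl 0
  have hM : pvM v 0 n 0 = List.foldl max (v 0) ((PySem.List.pyRange 1 n 1).map v) := by
    unfold pvM
    rw [hcons, List.map_cons]
    simp only [List.foldl_cons]
    rw [max_eq_right hv00]
  rw [hcons, List.map_cons]
  dsimp only
  rw [PySem.List.max?_id_cons]
  dsimp only
  rw [← hM, ← List.map_cons, ← hcons]
  by_cases hMz : pvM v 0 n 0 = 0
  · rw [if_pos hMz, if_neg (by omega)]
  · rw [if_neg hMz, if_pos (by omega)]
    have hexM : ∃ j ∈ PySem.List.pyRange 0 n 1, v j = pvM v 0 n 0 := by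
      rcases PySem.List.foldl_max_mem ((PySem.List.pyRange 0 n 1).map v) 0 with h | h
      · exact absurd h hMz
      · obtain ⟨j, hj, hvj⟩ := List.mem_map.mp h
        exact ⟨j, hj, hvj⟩
    have hidx := pv_index v (pvM v 0 n 0) n.toNat 0 (by
      simpa only [zero_add, hk] using hexM)
    simp only [zero_add, hk] at hidx
    obtain ⟨hple, hieq⟩ := hidx
    rw [hieq]
    dsimp only
    rw [sub_zero, Int.toNat_of_nonneg (by omega)]

-- ===== VERDICT (by name: the statement is the Claim_ definition above) =====
theorem getRecommendedFriends_spec : Claim_equal_getRecommendedFriends := by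
  intro n fr _ hpre
  unfold Spec_getRecommendedFriends
  by_cases hn : n ≤ 0
  · have h0 : n.toNat = 0 := by omega
    simp [getRecommendedFriends, getRecommendedFriends_alt,
      PySem.List.pyRange_one_eq_nil hn, PySem.List.pyRepeat_singleton, h0]
  · rw [not_le] at hn
    have hk : ((n.toNat : Nat) : Int) = n := by omega
    have hg0get : ∀ k, ((PySem.List.pyRange 0 n 1).foldl
        (fun d i => d.insert i PySem.Set.empty) PySem.Dict.empty).getD k PySem.Set.empty
        = PySem.Set.empty :=
      pv_init_getD _ _ (fun k => by simp [pysem])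
    have H := pv_build n fr (fun _ _ => False)
      ((PySem.List.pyRange 0 n 1).foldl (fun d i => d.insert i PySem.Set.empty) PySem.Dict.empty)
      (List.replicate n.toNat PySem.Set.empty)
      hpre
      (by simp)
      (by
        intro k
        rw [PySem.Dict.contains_iff_mem_keys, PySem.Dict.keys_foldl_insert]
        simp only [PySem.Dict.keys_empty]
        rw [PySem.Set.update_nil_left]
        rw [PySem.Set.mem_ofList, PySem.List.mem_pyRange_one])
      (PySem.Dict.nodup_keys_foldl_insert _ _ _ (by simp [pysem]))
      (fun k => by rw [hg0get]; exact List.nodup_nil)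
      (fun k x => by rw [hg0get]; simp)
      (by
        intro k hk0 hk1
        rw [hg0get, PySem.List.pyGetD_eq_getElem _ _ hk0 (by simp; omega)]
        simp)
    dsimp only at H
    obtain ⟨hlen', hnd', hchar', heq'⟩ := H
    simp only [false_or] at hchar'
    simp only [getRecommendedFriends, getRecommendedFriends_alt, pvBuildGraphA, pvBuildAdjB]
    rw [PySem.List.foldl_append_singleton_eq_map, List.nil_append, PySem.List.pyRepeat_singleton]
    conv_lhs => rw [← hk]
    rw [pv_outerA _ _ _ (by simp)]
    rw [hk]
    have hdrop : (List.replicate n.toNat (-1 : Int)).drop n.toNat = [] := by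
      simp
    rw [hdrop, List.append_nil]
    apply List.map_congr_left
    intro i hi
    rw [PySem.List.mem_pyRange_one] at hi
    exact pv_per_i n fr _ _ hnd' hchar' hlen' heq' i hi.1 hi.2
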